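-- pv_equiv track=rewrite | github.com/Wribbe/anki | anki.py | compress_empty_lines
-- ===== SOURCE A (Python) =====
-- def compress_empty_lines(lines):
--     last_was_empty = False
--     seen_non_empty = False
--     new_lines = []
--     for line in lines:
--         if not line.strip():
--             if not seen_non_empty or last_was_empty:
--                 continue
--             last_was_empty = True
--             new_lines.append(line)
--         else:
--             new_lines.append(line)
--             last_was_empty = False
--             seen_non_empty = True
--     return new_lines
-- ===== SOURCE B (Python) =====
-- def compress_empty_lines(lines):
--     # Run-based rewrite: scan maximal runs of equally-(non)empty lines;
--     # copy non-empty runs whole, keep only the first line of an empty run,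
--     # and drop a leading empty run entirely.
--     out = []
--     seen_non_empty = False
--     i, n = 0, len(lines)
--     while i < n:
--         empty = not lines[i].strip()
--         j = i
--         while j < n and (not lines[j].strip()) == empty:
--             j += 1
--         if not empty:
--             out.extend(lines[i:j])
--             seen_non_empty = True
--         elif seen_non_empty:
--             out.append(lines[i])
--         i = j
--     return out
-- ===== Notes on version B (the rewrite author's own statement) =====
-- stated objective: alternative
-- what changed: Replaced A's per-line two-flag state machine by a run-based scan that splits the input into maximal runs of empty/non-empty lines, copies non-empty runs whole, keeps only the first line of each empty run and drops a leading empty run.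
import Mathlib
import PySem

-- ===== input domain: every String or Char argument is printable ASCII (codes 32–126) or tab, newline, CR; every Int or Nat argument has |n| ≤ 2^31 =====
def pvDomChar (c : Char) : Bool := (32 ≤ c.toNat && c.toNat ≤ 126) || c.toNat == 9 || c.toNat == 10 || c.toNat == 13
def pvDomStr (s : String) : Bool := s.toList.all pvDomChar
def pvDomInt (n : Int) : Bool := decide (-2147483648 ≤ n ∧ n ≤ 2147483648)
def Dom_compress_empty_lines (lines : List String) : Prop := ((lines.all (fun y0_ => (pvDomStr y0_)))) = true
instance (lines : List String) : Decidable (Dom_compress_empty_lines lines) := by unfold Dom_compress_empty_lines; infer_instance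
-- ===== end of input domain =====

-- B is a run-based rewrite of A's per-line flag machine: same O(n) cost, different decomposition.

-- ===== PORT A =====
-- loop body of A; state: (last_was_empty, seen_non_empty, new_lines)
def pvStepA (st : Bool × Bool × List String) (line : String) : Bool × Bool × List String :=
  if PySem.Str.strip line == "" then
    if !st.2.1 || st.1 then st
    else (true, st.2.1, st.2.2 ++ [line])
  else (false, true, st.2.2 ++ [line])

def compress_empty_lines (lines : List String) : List String :=
  (lines.foldl pvStepA (false, false, ([] : List String))).2.2

-- ===== PORT B =====
-- split into maximal runs of equally-(non)empty lines (the inner `while j < n` scan)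
def pvRuns (lines : List String) : List (Bool × List String) :=
  match lines with
  | [] => []
  | x :: xs =>
    let e := PySem.Str.strip x == ""
    let run := xs.takeWhile (fun y => (PySem.Str.strip y == "") == e)
    let rest := xs.dropWhile (fun y => (PySem.Str.strip y == "") == e)
    (e, x :: run) :: pvRuns rest
termination_by lines.length
decreasing_by
  simp only [List.length_cons]
  exact Nat.lt_succ_of_le (List.length_dropWhile_le _ _)

-- per-run body of B; state: (seen_non_empty, out)
def pvStepB (st : Bool × List String) (g : Bool × List String) : Bool × List String :=
  if g.1 = false then (true, st.2 ++ g.2)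
  else if st.1 then (st.1, st.2 ++ g.2.take 1) else st

def compress_empty_lines_alt (lines : List String) : List String :=
  ((pvRuns lines).foldl pvStepB (false, ([] : List String))).2

-- ===== PRECONDITION & SPEC =====
def Spec_compress_empty_lines (lines : List String) (out : List String) : Prop := out = compress_empty_lines_alt lines
instance (lines : List String) (out : List String) : Decidable (Spec_compress_empty_lines lines out) := by unfold Spec_compress_empty_lines; infer_instance

-- ===== CLAIM (what is proved, stated in full; the proofs are below) =====
def Claim_equal_compress_empty_lines : Prop := ∀ (lines : List String), Dom_compress_empty_lines lines → Spec_compress_empty_lines lines (compress_empty_lines lines)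

-- ===== LEMMAS AND PROOFS =====

-- emptiness test shared by both proofs
def pvE (l : String) : Bool := PySem.Str.strip l == ""

-- reference recursion: what A computes, with explicit state
def pvCore (lwe sne : Bool) : List String → List String
  | [] => []
  | x :: xs =>
    if pvE x then
      if !sne || lwe then pvCore lwe sne xs
      else x :: pvCore true sne xs
    else x :: pvCore false true xs

theorem pvA_fold (ls : List String) (lwe sne : Bool) (acc : List String) :
    (ls.foldl pvStepA (lwe, sne, acc)).2.2 = acc ++ pvCore lwe sne ls := by
  induction ls generalizing lwe sne acc with
  | nil => simp [pvCore]
  | cons x xs ih =>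
    rw [List.foldl_cons, pvCore]
    by_cases hx : (PySem.Str.strip x == "") = true
    · by_cases hs : (!sne || lwe) = true
      · rw [show pvStepA (lwe, sne, acc) x = (lwe, sne, acc) by simp [pvStepA, hx, hs]]
        simp [pvE, hx, hs, ih]
      · rw [show pvStepA (lwe, sne, acc) x = (true, sne, acc ++ [x]) by simp [pvStepA, hx, hs]]
        simp [pvE, hx, hs, ih]
    · rw [show pvStepA (lwe, sne, acc) x = (false, true, acc ++ [x]) by simp [pvStepA, hx]]
      simp [pvE, hx, ih]

theorem pvCore_skip_false (run rest : List String) (lwe : Bool)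
    (h : ∀ y ∈ run, pvE y = true) :
    pvCore lwe false (run ++ rest) = pvCore lwe false rest := by
  induction run generalizing lwe with
  | nil => rfl
  | cons y ys ih =>
    have hy := h y (List.mem_cons_self ..)
    simp [pvCore, hy, ih _ (fun z hz => h z (List.mem_cons_of_mem _ hz))]

theorem pvCore_skip_lwe (run rest : List String)
    (h : ∀ y ∈ run, pvE y = true) :
    pvCore true true (run ++ rest) = pvCore true true rest := by
  induction run with
  | nil => rfl
  | cons y ys ih =>
    have hy := h y (List.mem_cons_self ..)
    simp [pvCore, hy, ih (fun z hz => h z (List.mem_cons_of_mem _ hz))]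

theorem pvCore_head_indep (rest : List String) (lwe lwe' : Bool)
    (h : rest = [] ∨ ∃ y ys, rest = y :: ys ∧ pvE y = false) :
    pvCore lwe true rest = pvCore lwe' true rest := by
  rcases h with h | ⟨y, ys, rfl, hy⟩
  · subst h; rfl
  · simp [pvCore, hy]

theorem pvCore_nonempty_run (run rest : List String)
    (h : ∀ y ∈ run, pvE y = false) :
    pvCore false true (run ++ rest) = run ++ pvCore false true rest := by
  induction run with
  | nil => rfl
  | cons y ys ih =>
    have hy := h y (List.mem_cons_self ..)
    simp [pvCore, hy, ih (fun z hz => h z (List.mem_cons_of_mem _ hz))]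

theorem pvDrop_head (p : String → Bool) (xs : List String) :
    xs.dropWhile p = [] ∨ ∃ y ys, xs.dropWhile p = y :: ys ∧ p y = false := by
  induction xs with
  | nil => exact Or.inl rfl
  | cons x xs ih =>
    by_cases hx : p x = true
    · simpa [List.dropWhile, hx] using ih
    · exact Or.inr ⟨x, xs, by simp [List.dropWhile, hx], by simpa using hx⟩

theorem pvB_fold (ls : List String) (sne : Bool) (acc : List String) :
    ((pvRuns ls).foldl pvStepB (sne, acc)).2 = acc ++ pvCore false sne ls := by
  induction ls using pvRuns.induct generalizing sne acc with
  | case1 => simp [pvRuns, pvCore]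
  | case2 x xs e rest ih =>
    have hsplit : xs.takeWhile (fun y => (PySem.Str.strip y == "") == e) ++ rest = xs :=
      List.takeWhile_append_dropWhile
    have hrun : ∀ y ∈ xs.takeWhile (fun y => (PySem.Str.strip y == "") == e), (pvE y == e) = true := by
      intro y hy
      simpa [pvE] using List.mem_takeWhile_imp hy
    have hrest := pvDrop_head (fun y => (PySem.Str.strip y == "") == e) xs
    have hxE : (pvE x == e) = true := by simp [pvE, e]
    rw [show pvRuns (x :: xs)
        = (e, x :: xs.takeWhile (fun y => (PySem.Str.strip y == "") == e)) :: pvRuns rest from by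
      rw [pvRuns]]
    rw [List.foldl_cons]
    conv_rhs => rw [← hsplit]
    by_cases he : e = true
    · rw [he] at hsplit hrun hxE ⊢
      have hxE' : pvE x = true := by simpa using hxE
      have hrun' : ∀ y ∈ xs.takeWhile (fun y => (PySem.Str.strip y == "") == true), pvE y = true := by
        intro y hy; simpa using hrun y hy
      cases sne with
      | true =>
        rw [show pvStepB (true, acc) (true, x :: xs.takeWhile (fun y => (PySem.Str.strip y == "") == true))
            = (true, acc ++ [x]) from by simp [pvStepB]]
        rw [ih]
        rw [show pvCore false true (x :: (xs.takeWhile (fun y => (PySem.Str.strip y == "") == true) ++ rest))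
            = x :: pvCore true true (xs.takeWhile (fun y => (PySem.Str.strip y == "") == true) ++ rest) from by
          simp [pvCore, hxE']]
        rw [pvCore_skip_lwe _ _ hrun']
        rw [show pvCore true true rest = pvCore false true rest from by
          apply pvCore_head_indep
          rcases hrest with h | ⟨y, ys, hy, hpy⟩
          · exact Or.inl h
          · exact Or.inr ⟨y, ys, hy, by simpa [pvE, he] using hpy⟩]
        simp
      | false =>
        rw [show pvStepB (false, acc) (true, x :: xs.takeWhile (fun y => (PySem.Str.strip y == "") == true))
            = (false, acc) from by simp [pvStepB]]
        rw [ih]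
        rw [show pvCore false false (x :: (xs.takeWhile (fun y => (PySem.Str.strip y == "") == true) ++ rest))
            = pvCore false false rest from by
          have := pvCore_skip_false (x :: xs.takeWhile (fun y => (PySem.Str.strip y == "") == true)) rest false
            (by intro y hy; rcases List.mem_cons.mp hy with h | h
                · subst h; exact hxE'
                · exact hrun' y h)
          simpa using this]
    · have he' : e = false := by simpa using he
      rw [he'] at hsplit hrun hxE ⊢
      have hxE' : pvE x = false := by simpa using hxE
      have hrun' : ∀ y ∈ xs.takeWhile (fun y => (PySem.Str.strip y == "") == false), pvE y = false := by
        intro y hy; simpa using hrun y hy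
      rw [show pvStepB (sne, acc) (false, x :: xs.takeWhile (fun y => (PySem.Str.strip y == "") == false))
          = (true, acc ++ (x :: xs.takeWhile (fun y => (PySem.Str.strip y == "") == false))) from by
        simp [pvStepB]]
      rw [ih]
      rw [show pvCore false sne (x :: (xs.takeWhile (fun y => (PySem.Str.strip y == "") == false) ++ rest))
          = x :: pvCore false true (xs.takeWhile (fun y => (PySem.Str.strip y == "") == false) ++ rest) from by
        simp [pvCore, hxE']]
      rw [pvCore_nonempty_run _ _ hrun']
      simp

theorem compress_empty_lines_spec : Claim_equal_compress_empty_lines := by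
  intro lines _
  unfold Spec_compress_empty_lines compress_empty_lines compress_empty_lines_alt
  rw [pvA_fold, pvB_fold]
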